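-- pv_equiv track=rewrite | github.com/yoanyuruena2004-ctrl/distrinova-erp | taller_3/6.py | balancear_linea_optimizado
-- ===== SOURCE A (Python) =====
-- GRAFO_TAREAS = {
--     1: [2, []], 2: [6, [1]], 3: [6, [2]], 4: [2, [2]], 5: [2, [2]],
--     6: [12, [2]], 7: [7, [3, 4]], 8: [5, [7]], 9: [1, [5]], 10: [4, [6, 9]],
--     11: [6, [8, 10]], 12: [7, [11]]
-- }
--
-- def obtener_candidatos(tareas_asignadas, tiempo_restante_estacion):
--     """Identifica tareas disponibles y que caben en la estación."""
--     candidatos = []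
--     for tarea, data in GRAFO_TAREAS.items():
--         if tarea in tareas_asignadas:
--             continue
--         tiempo_tarea = data[0]
--         precedencias = data[1]
--         precedencias_cumplidas = all(p in tareas_asignadas for p in precedencias)
--
--         if precedencias_cumplidas and tiempo_tarea <= tiempo_restante_estacion:
--             candidatos.append(tarea)
--     return candidatos
--
-- def balancear_linea_optimizado(tiempo_ciclo_max):
--     """Algoritmo Dinámico Greedy (LCR) para asignación de tareas."""
--     tareas_asignadas = set()
--     estaciones = {}
--     estacion_id = 1
--     total_tareas = len(GRAFO_TAREAS)
--
--     while len(tareas_asignadas) < total_tareas: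
--         tiempo_actual_estacion = 0
--         tareas_en_estacion = []
--
--         while True:
--             tiempo_restante = tiempo_ciclo_max - tiempo_actual_estacion
--             candidatos = obtener_candidatos(tareas_asignadas, tiempo_restante)
--
--             if not candidatos:
--                 break
--
--             # Regla LCR: Elegir la tarea más larga disponible para optimizar el empaquetado
--             mejor_tarea = max(candidatos, key=lambda t: GRAFO_TAREAS[t][0])
--
--             # Asignar
--             tareas_en_estacion.append(mejor_tarea)
--             tareas_asignadas.add(mejor_tarea)
--             tiempo_actual_estacion += GRAFO_TAREAS[mejor_tarea][0]
--
--         estaciones[estacion_id] = tareas_en_estacion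
--         estacion_id += 1
--
--     return estaciones
-- ===== SOURCE B (Python) =====
-- GRAFO_TAREAS = {
--     1: [2, []], 2: [6, [1]], 3: [6, [2]], 4: [2, [2]], 5: [2, [2]],
--     6: [12, [2]], 7: [7, [3, 4]], 8: [5, [7]], 9: [1, [5]], 10: [4, [6, 9]],
--     11: [6, [8, 10]], 12: [7, [11]]
-- }
--
-- def balancear_linea_optimizado(tiempo_ciclo_max):
--     """Greedy LCR via a maintained ready set (unmet-precedence counters) instead of
--     rescanning the whole graph each step."""
--     pendientes = {t: len(data[1]) for t, data in GRAFO_TAREAS.items()}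
--     dependientes = {t: [] for t in GRAFO_TAREAS}
--     for t, data in GRAFO_TAREAS.items():
--         for p in data[1]:
--             dependientes[p].append(t)
--     listas = sorted(t for t, n in pendientes.items() if n == 0)
--     estaciones = {}
--     estacion_id = 1
--     restantes = len(GRAFO_TAREAS)
--     while restantes > 0:
--         tiempo_restante = tiempo_ciclo_max
--         tareas_en_estacion = []
--         while True:
--             mejor = None
--             for t in listas:  # ascending id: first maximal wins, like A's dict-order max
--                 if GRAFO_TAREAS[t][0] <= tiempo_restante and \
--                    (mejor is None or GRAFO_TAREAS[t][0] > GRAFO_TAREAS[mejor][0]):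
--                     mejor = t
--             if mejor is None:
--                 break
--             listas.remove(mejor)
--             tareas_en_estacion.append(mejor)
--             restantes -= 1
--             tiempo_restante -= GRAFO_TAREAS[mejor][0]
--             for d in dependientes[mejor]:
--                 pendientes[d] -= 1
--                 if pendientes[d] == 0:
--                     # insert keeping ascending order
--                     i = 0
--                     while i < len(listas) and listas[i] < d:
--                         i += 1
--                     listas.insert(i, d)
--         estaciones[estacion_id] = tareas_en_estacion
--         estacion_id += 1
--     return estaciones
-- ===== Notes on version B (the rewrite author's own statement) =====
-- stated objective: alternative
-- what changed: B precomputes unmet-precedence counters and a reverse-dependency map and maintains a sorted ready list, so each greedy pick scans only currently-ready tasks instead of rescanning the whole graph and rechecking every precedence each step (same outputs, same intentional non-termination below cycle time 12).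
import Mathlib
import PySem

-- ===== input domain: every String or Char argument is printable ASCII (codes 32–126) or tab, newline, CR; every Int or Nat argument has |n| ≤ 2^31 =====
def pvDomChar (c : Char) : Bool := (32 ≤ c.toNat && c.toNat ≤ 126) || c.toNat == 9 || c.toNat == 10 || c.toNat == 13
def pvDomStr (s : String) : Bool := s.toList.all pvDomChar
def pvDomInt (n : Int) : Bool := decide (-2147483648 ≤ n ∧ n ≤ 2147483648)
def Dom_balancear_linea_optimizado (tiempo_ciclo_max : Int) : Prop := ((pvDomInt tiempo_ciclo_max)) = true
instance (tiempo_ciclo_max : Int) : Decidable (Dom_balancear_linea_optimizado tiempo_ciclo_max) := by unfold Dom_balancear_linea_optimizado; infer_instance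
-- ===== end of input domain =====

-- B replaces A's per-step full rescan of the task graph with a maintained ready list
-- (unmet-precedence counters + a reverse-dependency map); objective: alternative structure, same results.

-- ===== PORT A =====

def grafoTareas : List (Int × Int × List Int) :=
  [(1, 2, []), (2, 6, [1]), (3, 6, [2]), (4, 2, [2]), (5, 2, [2]),
   (6, 12, [2]), (7, 7, [3, 4]), (8, 5, [7]), (9, 1, [5]), (10, 4, [6, 9]),
   (11, 6, [8, 10]), (12, 7, [11])]

def tiempoTarea (t : Int) : Int :=
  (((grafoTareas.find? (fun x => x.1 == t)).map (fun x => x.2.1)).getD 0)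

def obtener_candidatos (asig : PySem.Set Int) (rest : Int) : List Int :=
  grafoTareas.foldl (fun cand x =>
    if x.1 ∈ asig then cand
    else if (∀ p ∈ x.2.2, p ∈ asig) ∧ x.2.1 ≤ rest then cand ++ [x.1] else cand) []

def innerA (tcm : Int) : Nat → PySem.Set Int → Int → List Int → PySem.Set Int × List Int
  | 0, asig, _, est => (asig, est)
  | fuel+1, asig, used, est =>
    let cand := obtener_candidatos asig (tcm - used)
    match PySem.List.max? cand (fun t => tiempoTarea t) with
    | none => (asig, est)
    | some mejor =>
        innerA tcm fuel (PySem.Set.add asig mejor) (used + tiempoTarea mejor) (est ++ [mejor])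

def outerA (tcm : Int) : Nat → PySem.Set Int → Int → PySem.Dict Int (List Int) → PySem.Dict Int (List Int)
  | 0, _, _, est => est
  | fuel+1, asig, sid, est =>
    if (asig.length : Int) < (grafoTareas.length : Int) then
      let r := innerA tcm 13 asig 0 []
      outerA tcm fuel r.1 (sid + 1) (est.insert sid r.2)
    else est

def balancear_linea_optimizado (tiempo_ciclo_max : Int) : List (Int × List Int) :=
  (outerA tiempo_ciclo_max 13 [] 1 PySem.Dict.empty).items

-- PORT B
def pendientes0 : PySem.Dict Int Int :=
  grafoTareas.foldl (fun d x => d.insert x.1 (x.2.2.length : Int)) PySem.Dict.empty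

def dependientes0 : PySem.Dict Int (List Int) :=
  grafoTareas.foldl (fun d x => x.2.2.foldl (fun d2 p => d2.modify p [] (fun l => l ++ [x.1])) d)
    (grafoTareas.foldl (fun d x => d.insert x.1 []) PySem.Dict.empty)

def listas0 : List Int :=
  PySem.List.sorted ((pendientes0.items.filter (fun kv => kv.2 == 0)).map (fun kv => kv.1)) (fun x => x) false

def seleccionar (listas : List Int) (rest : Int) : Option Int :=
  listas.foldl (fun mejor t =>
    if tiempoTarea t ≤ rest ∧ (∀ m ∈ mejor, tiempoTarea m < tiempoTarea t) then some t else mejor) none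

def insertarOrdenado : List Int → Int → List Int
  | [], d => [d]
  | x :: xs, d => if x < d then x :: insertarOrdenado xs d else d :: x :: xs

def procesarDeps (mejor : Int) (pend : PySem.Dict Int Int) (listas : List Int) :
    PySem.Dict Int Int × List Int :=
  (dependientes0.getD mejor []).foldl (fun s d =>
    let p := s.1.modify d 0 (fun n => n - 1)
    if p.getD d 0 = 0 then (p, insertarOrdenado s.2 d) else (p, s.2)) (pend, listas)

def innerB : Nat → List Int → PySem.Dict Int Int → Int → Int → List Int →
    List Int × PySem.Dict Int Int × Int × List Int
  | 0, listas, pend, restantes, _, st => (listas, pend, restantes, st)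
  | fuel+1, listas, pend, restantes, rest, st =>
    match seleccionar listas rest with
    | none => (listas, pend, restantes, st)
    | some mejor =>
      let listas1 := (PySem.List.remove? listas mejor).getD listas
      let s := procesarDeps mejor pend listas1
      innerB fuel s.2 s.1 (restantes - 1) (rest - tiempoTarea mejor) (st ++ [mejor])

def outerB (tcm : Int) : Nat → List Int → PySem.Dict Int Int → Int → Int →
    PySem.Dict Int (List Int) → PySem.Dict Int (List Int)
  | 0, _, _, _, _, est => est
  | fuel+1, listas, pend, restantes, sid, est =>
    if 0 < restantes then
      let r := innerB 13 listas pend restantes tcm []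
      outerB tcm fuel r.1 r.2.1 r.2.2.1 (sid + 1) (est.insert sid r.2.2.2)
    else est

def balancear_linea_optimizado_alt (tiempo_ciclo_max : Int) : List (Int × List Int) :=
  (outerB tiempo_ciclo_max 13 listas0 pendientes0 (grafoTareas.length : Int) 1 PySem.Dict.empty).items

-- ===== PRECONDITION & SPEC =====
-- Pre_ excludes tiempo_ciclo_max < 12 (the largest task time): there the Python A loops forever
-- (a station can stay empty while tasks remain), so A never returns.
def Pre_balancear_linea_optimizado (tiempo_ciclo_max : Int) : Prop := 12 ≤ tiempo_ciclo_max
instance (tiempo_ciclo_max : Int) : Decidable (Pre_balancear_linea_optimizado tiempo_ciclo_max) := by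
  unfold Pre_balancear_linea_optimizado; infer_instance

def pvWitness_balancear_linea_optimizado : Int := (17)

def Spec_balancear_linea_optimizado (tiempo_ciclo_max : Int) (out : List (Int × List Int)) : Prop := out = balancear_linea_optimizado_alt tiempo_ciclo_max
instance (tiempo_ciclo_max : Int) (out : List (Int × List Int)) : Decidable (Spec_balancear_linea_optimizado tiempo_ciclo_max out) := by unfold Spec_balancear_linea_optimizado; infer_instance

-- ===== CLAIM (what is proved, stated in full; the proofs are below) =====
def Claim_equal_balancear_linea_optimizado : Prop := ∀ (tiempo_ciclo_max : Int), Dom_balancear_linea_optimizado tiempo_ciclo_max → Pre_balancear_linea_optimizado tiempo_ciclo_max → Spec_balancear_linea_optimizado tiempo_ciclo_max (balancear_linea_optimizado tiempo_ciclo_max)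

-- ===== LEMMAS AND PROOFS =====
lemma innerA_step (tcm : Int) (f : Nat) (asig : PySem.Set Int) (used : Int) (est cand : List Int)
    (m : Int) (hc : obtener_candidatos asig (tcm - used) = cand)
    (hm : PySem.List.max? cand (fun t => tiempoTarea t) = some m) :
    innerA tcm (f+1) asig used est
      = innerA tcm f (PySem.Set.add asig m) (used + tiempoTarea m) (est ++ [m]) := by
  simp only [innerA, hc, hm]

lemma innerA_stop (tcm : Int) (f : Nat) (asig : PySem.Set Int) (used : Int) (est : List Int)
    (hc : obtener_candidatos asig (tcm - used) = [])
    (hm : PySem.List.max? ([] : List Int) (fun t => tiempoTarea t) = none) :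
    innerA tcm (f+1) asig used est = (asig, est) := by
  simp only [innerA, hc, hm]

lemma outerA_go (tcm : Int) (f : Nat) (asig : PySem.Set Int) (sid : Int)
    (est : PySem.Dict Int (List Int)) (h : (asig.length : Int) < (grafoTareas.length : Int)) :
    outerA tcm (f+1) asig sid est
      = outerA tcm f (innerA tcm 13 asig 0 []).1 (sid + 1) (est.insert sid (innerA tcm 13 asig 0 []).2) := by
  simp only [outerA, if_pos h]

lemma outerA_done (tcm : Int) (f : Nat) (asig : PySem.Set Int) (sid : Int)
    (est : PySem.Dict Int (List Int)) (h : ¬ (asig.length : Int) < (grafoTareas.length : Int)) :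
    outerA tcm (f+1) asig sid est = est := by
  simp only [outerA, if_neg h]

lemma innerB_step (f : Nat) (L : List Int) (P : PySem.Dict Int Int) (restn rest : Int)
    (st : List Int) (m : Int) (hs : seleccionar L rest = some m) :
    innerB (f+1) L P restn rest st
      = innerB f (procesarDeps m P ((PySem.List.remove? L m).getD L)).2
          (procesarDeps m P ((PySem.List.remove? L m).getD L)).1
          (restn - 1) (rest - tiempoTarea m) (st ++ [m]) := by
  simp only [innerB, hs]

lemma innerB_stop (f : Nat) (L : List Int) (P : PySem.Dict Int Int) (restn rest : Int)
    (st : List Int) (hs : seleccionar L rest = none) :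
    innerB (f+1) L P restn rest st = (L, P, restn, st) := by
  simp only [innerB, hs]

lemma outerB_go (tcm : Int) (f : Nat) (L : List Int) (P : PySem.Dict Int Int) (restn sid : Int)
    (est : PySem.Dict Int (List Int)) (h : 0 < restn) :
    outerB tcm (f+1) L P restn sid est
      = outerB tcm f (innerB 13 L P restn tcm []).1 (innerB 13 L P restn tcm []).2.1
          (innerB 13 L P restn tcm []).2.2.1 (sid + 1)
          (est.insert sid (innerB 13 L P restn tcm []).2.2.2) := by
  simp only [outerB, if_pos h]

lemma outerB_done (tcm : Int) (f : Nat) (L : List Int) (P : PySem.Dict Int Int) (restn sid : Int)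
    (est : PySem.Dict Int (List Int)) (h : ¬ 0 < restn) :
    outerB tcm (f+1) L P restn sid est = est := by
  simp only [outerB, if_neg h]

lemma candA_0 (r : Int) (h2 : (2:Int) ≤ r): obtener_candidatos [] r = [1] := by
  simp [obtener_candidatos, grafoTareas, h2, ← List.eq_nil_iff_forall_not_mem]

lemma candA_1 (r : Int) (h6 : (6:Int) ≤ r): obtener_candidatos [1] r = [2] := by
  simp [obtener_candidatos, grafoTareas, h6]

lemma candA_2 (r : Int) (h2 : (2:Int) ≤ r) (h6 : (6:Int) ≤ r) (h12 : (12:Int) ≤ r): obtener_candidatos [1, 2] r = [3, 4, 5, 6] := by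
  simp [obtener_candidatos, grafoTareas, h2, h6, h12]

lemma candA_3 (r : Int) (h2 : (2:Int) ≤ r) (h6 : (6:Int) ≤ r): obtener_candidatos [1, 2, 6] r = [3, 4, 5] := by
  simp [obtener_candidatos, grafoTareas, h2, h6]

lemma candA_4 (r : Int) (h2 : (2:Int) ≤ r): obtener_candidatos [1, 2, 6, 3] r = [4, 5] := by
  simp [obtener_candidatos, grafoTareas, h2]

lemma candA_5 (r : Int) (h2 : (2:Int) ≤ r) (h7 : (7:Int) ≤ r): obtener_candidatos [1, 2, 6, 3, 4] r = [5, 7] := by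
  simp [obtener_candidatos, grafoTareas, h2, h7]

lemma candA_6 (r : Int) (h2 : (2:Int) ≤ r) (h5 : (5:Int) ≤ r): obtener_candidatos [1, 2, 6, 3, 4, 7] r = [5, 8] := by
  simp [obtener_candidatos, grafoTareas, h2, h5]

lemma candA_7 (r : Int) (h2 : (2:Int) ≤ r): obtener_candidatos [1, 2, 6, 3, 4, 7, 8] r = [5] := by
  simp [obtener_candidatos, grafoTareas, h2]

lemma candA_8 (r : Int) (h1 : (1:Int) ≤ r): obtener_candidatos [1, 2, 6, 3, 4, 7, 8, 5] r = [9] := by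
  simp [obtener_candidatos, grafoTareas, h1]

lemma candA_9 (r : Int) (h4 : (4:Int) ≤ r): obtener_candidatos [1, 2, 6, 3, 4, 7, 8, 5, 9] r = [10] := by
  simp [obtener_candidatos, grafoTareas, h4]

lemma candA_10 (r : Int) (h6 : (6:Int) ≤ r): obtener_candidatos [1, 2, 6, 3, 4, 7, 8, 5, 9, 10] r = [11] := by
  simp [obtener_candidatos, grafoTareas, h6]

lemma candA_11 (r : Int) (h7 : (7:Int) ≤ r): obtener_candidatos [1, 2, 6, 3, 4, 7, 8, 5, 9, 10, 11] r = [12] := by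
  simp [obtener_candidatos, grafoTareas, h7]

lemma candA_12 (r : Int) : obtener_candidatos [1, 2, 6, 3, 4, 7, 8, 5, 9, 10, 11, 12] r = [] := by
  simp [obtener_candidatos, grafoTareas]

lemma selB_0 (r : Int) (h2 : (2:Int) ≤ r): seleccionar [1] r = (some 1 : Option Int) := by
  simp [seleccionar, tiempoTarea, grafoTareas, h2]

lemma selB_1 (r : Int) (h6 : (6:Int) ≤ r): seleccionar [2] r = (some 2 : Option Int) := by
  simp [seleccionar, tiempoTarea, grafoTareas, h6]

lemma selB_2 (r : Int) (h2 : (2:Int) ≤ r) (h6 : (6:Int) ≤ r) (h12 : (12:Int) ≤ r): seleccionar [3, 4, 5, 6] r = (some 6 : Option Int) := by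
  simp [seleccionar, tiempoTarea, grafoTareas, h2, h6, h12]

lemma selB_3 (r : Int) (h2 : (2:Int) ≤ r) (h6 : (6:Int) ≤ r): seleccionar [3, 4, 5] r = (some 3 : Option Int) := by
  simp [seleccionar, tiempoTarea, grafoTareas, h2, h6]

lemma selB_4 (r : Int) (h2 : (2:Int) ≤ r): seleccionar [4, 5] r = (some 4 : Option Int) := by
  simp [seleccionar, tiempoTarea, grafoTareas, h2]

lemma selB_5 (r : Int) (h2 : (2:Int) ≤ r) (h7 : (7:Int) ≤ r): seleccionar [5, 7] r = (some 7 : Option Int) := by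
  simp [seleccionar, tiempoTarea, grafoTareas, h2, h7]

lemma selB_6 (r : Int) (h2 : (2:Int) ≤ r) (h5 : (5:Int) ≤ r): seleccionar [5, 8] r = (some 8 : Option Int) := by
  simp [seleccionar, tiempoTarea, grafoTareas, h2, h5]

lemma selB_7 (r : Int) (h2 : (2:Int) ≤ r): seleccionar [5] r = (some 5 : Option Int) := by
  simp [seleccionar, tiempoTarea, grafoTareas, h2]

lemma selB_8 (r : Int) (h1 : (1:Int) ≤ r): seleccionar [9] r = (some 9 : Option Int) := by
  simp [seleccionar, tiempoTarea, grafoTareas, h1]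

lemma selB_9 (r : Int) (h4 : (4:Int) ≤ r): seleccionar [10] r = (some 10 : Option Int) := by
  simp [seleccionar, tiempoTarea, grafoTareas, h4]

lemma selB_10 (r : Int) (h6 : (6:Int) ≤ r): seleccionar [11] r = (some 11 : Option Int) := by
  simp [seleccionar, tiempoTarea, grafoTareas, h6]

lemma selB_11 (r : Int) (h7 : (7:Int) ≤ r): seleccionar [12] r = (some 12 : Option Int) := by
  simp [seleccionar, tiempoTarea, grafoTareas, h7]

lemma selB_12 (r : Int) : seleccionar [] r = (none : Option Int) := by
  simp [seleccionar, tiempoTarea, grafoTareas]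

lemma A_big (tcm : Int) (h : 60 ≤ tcm) :
    balancear_linea_optimizado tcm = [(1, [1, 2, 6, 3, 4, 7, 8, 5, 9, 10, 11, 12])] := by
  have a0 : innerA tcm 13 [] 0 [] = innerA tcm 12 [1] 2 [1] := by
    refine (innerA_step tcm 12 [] 0 [] [1] 1 (candA_0 _ (by omega)) (by decide)).trans ?_
    congr 1
  have a1 : innerA tcm 12 [1] 2 [1] = innerA tcm 11 [1, 2] 8 [1, 2] := by
    refine (innerA_step tcm 11 [1] 2 [1] [2] 2 (candA_1 _ (by omega)) (by decide)).trans ?_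
    congr 1
  have a2 : innerA tcm 11 [1, 2] 8 [1, 2] = innerA tcm 10 [1, 2, 6] 20 [1, 2, 6] := by
    refine (innerA_step tcm 10 [1, 2] 8 [1, 2] [3, 4, 5, 6] 6 (candA_2 _ (by omega) (by omega) (by omega)) (by decide)).trans ?_
    congr 1
  have a3 : innerA tcm 10 [1, 2, 6] 20 [1, 2, 6] = innerA tcm 9 [1, 2, 6, 3] 26 [1, 2, 6, 3] := by
    refine (innerA_step tcm 9 [1, 2, 6] 20 [1, 2, 6] [3, 4, 5] 3 (candA_3 _ (by omega) (by omega)) (by decide)).trans ?_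
    congr 1
  have a4 : innerA tcm 9 [1, 2, 6, 3] 26 [1, 2, 6, 3] = innerA tcm 8 [1, 2, 6, 3, 4] 28 [1, 2, 6, 3, 4] := by
    refine (innerA_step tcm 8 [1, 2, 6, 3] 26 [1, 2, 6, 3] [4, 5] 4 (candA_4 _ (by omega)) (by decide)).trans ?_
    congr 1
  have a5 : innerA tcm 8 [1, 2, 6, 3, 4] 28 [1, 2, 6, 3, 4] = innerA tcm 7 [1, 2, 6, 3, 4, 7] 35 [1, 2, 6, 3, 4, 7] := by
    refine (innerA_step tcm 7 [1, 2, 6, 3, 4] 28 [1, 2, 6, 3, 4] [5, 7] 7 (candA_5 _ (by omega) (by omega)) (by decide)).trans ?_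
    congr 1
  have a6 : innerA tcm 7 [1, 2, 6, 3, 4, 7] 35 [1, 2, 6, 3, 4, 7] = innerA tcm 6 [1, 2, 6, 3, 4, 7, 8] 40 [1, 2, 6, 3, 4, 7, 8] := by
    refine (innerA_step tcm 6 [1, 2, 6, 3, 4, 7] 35 [1, 2, 6, 3, 4, 7] [5, 8] 8 (candA_6 _ (by omega) (by omega)) (by decide)).trans ?_
    congr 1
  have a7 : innerA tcm 6 [1, 2, 6, 3, 4, 7, 8] 40 [1, 2, 6, 3, 4, 7, 8] = innerA tcm 5 [1, 2, 6, 3, 4, 7, 8, 5] 42 [1, 2, 6, 3, 4, 7, 8, 5] := by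
    refine (innerA_step tcm 5 [1, 2, 6, 3, 4, 7, 8] 40 [1, 2, 6, 3, 4, 7, 8] [5] 5 (candA_7 _ (by omega)) (by decide)).trans ?_
    congr 1
  have a8 : innerA tcm 5 [1, 2, 6, 3, 4, 7, 8, 5] 42 [1, 2, 6, 3, 4, 7, 8, 5] = innerA tcm 4 [1, 2, 6, 3, 4, 7, 8, 5, 9] 43 [1, 2, 6, 3, 4, 7, 8, 5, 9] := by
    refine (innerA_step tcm 4 [1, 2, 6, 3, 4, 7, 8, 5] 42 [1, 2, 6, 3, 4, 7, 8, 5] [9] 9 (candA_8 _ (by omega)) (by decide)).trans ?_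
    congr 1
  have a9 : innerA tcm 4 [1, 2, 6, 3, 4, 7, 8, 5, 9] 43 [1, 2, 6, 3, 4, 7, 8, 5, 9] = innerA tcm 3 [1, 2, 6, 3, 4, 7, 8, 5, 9, 10] 47 [1, 2, 6, 3, 4, 7, 8, 5, 9, 10] := by
    refine (innerA_step tcm 3 [1, 2, 6, 3, 4, 7, 8, 5, 9] 43 [1, 2, 6, 3, 4, 7, 8, 5, 9] [10] 10 (candA_9 _ (by omega)) (by decide)).trans ?_
    congr 1
  have a10 : innerA tcm 3 [1, 2, 6, 3, 4, 7, 8, 5, 9, 10] 47 [1, 2, 6, 3, 4, 7, 8, 5, 9, 10] = innerA tcm 2 [1, 2, 6, 3, 4, 7, 8, 5, 9, 10, 11] 53 [1, 2, 6, 3, 4, 7, 8, 5, 9, 10, 11] := by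
    refine (innerA_step tcm 2 [1, 2, 6, 3, 4, 7, 8, 5, 9, 10] 47 [1, 2, 6, 3, 4, 7, 8, 5, 9, 10] [11] 11 (candA_10 _ (by omega)) (by decide)).trans ?_
    congr 1
  have a11 : innerA tcm 2 [1, 2, 6, 3, 4, 7, 8, 5, 9, 10, 11] 53 [1, 2, 6, 3, 4, 7, 8, 5, 9, 10, 11] = innerA tcm 1 [1, 2, 6, 3, 4, 7, 8, 5, 9, 10, 11, 12] 60 [1, 2, 6, 3, 4, 7, 8, 5, 9, 10, 11, 12] := by
    refine (innerA_step tcm 1 [1, 2, 6, 3, 4, 7, 8, 5, 9, 10, 11] 53 [1, 2, 6, 3, 4, 7, 8, 5, 9, 10, 11] [12] 12 (candA_11 _ (by omega)) (by decide)).trans ?_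
    congr 1
  have a12 : innerA tcm 1 [1, 2, 6, 3, 4, 7, 8, 5, 9, 10, 11, 12] 60 [1, 2, 6, 3, 4, 7, 8, 5, 9, 10, 11, 12] = ([1, 2, 6, 3, 4, 7, 8, 5, 9, 10, 11, 12], [1, 2, 6, 3, 4, 7, 8, 5, 9, 10, 11, 12]) :=
    innerA_stop tcm 0 [1, 2, 6, 3, 4, 7, 8, 5, 9, 10, 11, 12] 60 [1, 2, 6, 3, 4, 7, 8, 5, 9, 10, 11, 12] (candA_12 _) (by decide)
  have atr : innerA tcm 13 [] 0 [] = ([1, 2, 6, 3, 4, 7, 8, 5, 9, 10, 11, 12], [1, 2, 6, 3, 4, 7, 8, 5, 9, 10, 11, 12]) := a0 |>.trans a1 |>.trans a2 |>.trans a3 |>.trans a4 |>.trans a5 |>.trans a6 |>.trans a7 |>.trans a8 |>.trans a9 |>.trans a10 |>.trans a11 |>.trans a12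
  have o1 : outerA tcm 13 [] 1 PySem.Dict.empty = outerA tcm 12 (innerA tcm 13 [] 0 []).1 2 (PySem.Dict.empty.insert 1 (innerA tcm 13 [] 0 []).2) :=
    outerA_go tcm 12 [] 1 PySem.Dict.empty (by decide)
  unfold balancear_linea_optimizado
  rw [o1, atr]
  rw [outerA_done tcm 11 _ 2 _ (by decide)]; decide

lemma B_big (tcm : Int) (h : 60 ≤ tcm) :
    balancear_linea_optimizado_alt tcm = [(1, [1, 2, 6, 3, 4, 7, 8, 5, 9, 10, 11, 12])] := by
  have b0 : innerB 13 [1] (PySem.Dict.mk [(1, 0), (2, 1), (3, 1), (4, 1), (5, 1), (6, 1), (7, 2), (8, 1), (9, 1), (10, 2), (11, 2), (12, 1)]) 12 (tcm) [] = innerB 12 [2] (PySem.Dict.mk [(1, 0), (2, 0), (3, 1), (4, 1), (5, 1), (6, 1), (7, 2), (8, 1), (9, 1), (10, 2), (11, 2), (12, 1)]) 11 (tcm - 2) [1] := by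
    refine (innerB_step 12 [1] (PySem.Dict.mk [(1, 0), (2, 1), (3, 1), (4, 1), (5, 1), (6, 1), (7, 2), (8, 1), (9, 1), (10, 2), (11, 2), (12, 1)]) 12 (tcm) [] 1 (selB_0 _ (by omega))).trans ?_
    congr 1
  have b1 : innerB 12 [2] (PySem.Dict.mk [(1, 0), (2, 0), (3, 1), (4, 1), (5, 1), (6, 1), (7, 2), (8, 1), (9, 1), (10, 2), (11, 2), (12, 1)]) 11 (tcm - 2) [1] = innerB 11 [3, 4, 5, 6] (PySem.Dict.mk [(1, 0), (2, 0), (3, 0), (4, 0), (5, 0), (6, 0), (7, 2), (8, 1), (9, 1), (10, 2), (11, 2), (12, 1)]) 10 (tcm - 2 - 6) [1, 2] := by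
    refine (innerB_step 11 [2] (PySem.Dict.mk [(1, 0), (2, 0), (3, 1), (4, 1), (5, 1), (6, 1), (7, 2), (8, 1), (9, 1), (10, 2), (11, 2), (12, 1)]) 11 (tcm - 2) [1] 2 (selB_1 _ (by omega))).trans ?_
    congr 1
  have b2 : innerB 11 [3, 4, 5, 6] (PySem.Dict.mk [(1, 0), (2, 0), (3, 0), (4, 0), (5, 0), (6, 0), (7, 2), (8, 1), (9, 1), (10, 2), (11, 2), (12, 1)]) 10 (tcm - 2 - 6) [1, 2] = innerB 10 [3, 4, 5] (PySem.Dict.mk [(1, 0), (2, 0), (3, 0), (4, 0), (5, 0), (6, 0), (7, 2), (8, 1), (9, 1), (10, 1), (11, 2), (12, 1)]) 9 (tcm - 2 - 6 - 12) [1, 2, 6] := by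
    refine (innerB_step 10 [3, 4, 5, 6] (PySem.Dict.mk [(1, 0), (2, 0), (3, 0), (4, 0), (5, 0), (6, 0), (7, 2), (8, 1), (9, 1), (10, 2), (11, 2), (12, 1)]) 10 (tcm - 2 - 6) [1, 2] 6 (selB_2 _ (by omega) (by omega) (by omega))).trans ?_
    congr 1
  have b3 : innerB 10 [3, 4, 5] (PySem.Dict.mk [(1, 0), (2, 0), (3, 0), (4, 0), (5, 0), (6, 0), (7, 2), (8, 1), (9, 1), (10, 1), (11, 2), (12, 1)]) 9 (tcm - 2 - 6 - 12) [1, 2, 6] = innerB 9 [4, 5] (PySem.Dict.mk [(1, 0), (2, 0), (3, 0), (4, 0), (5, 0), (6, 0), (7, 1), (8, 1), (9, 1), (10, 1), (11, 2), (12, 1)]) 8 (tcm - 2 - 6 - 12 - 6) [1, 2, 6, 3] := by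
    refine (innerB_step 9 [3, 4, 5] (PySem.Dict.mk [(1, 0), (2, 0), (3, 0), (4, 0), (5, 0), (6, 0), (7, 2), (8, 1), (9, 1), (10, 1), (11, 2), (12, 1)]) 9 (tcm - 2 - 6 - 12) [1, 2, 6] 3 (selB_3 _ (by omega) (by omega))).trans ?_
    congr 1
  have b4 : innerB 9 [4, 5] (PySem.Dict.mk [(1, 0), (2, 0), (3, 0), (4, 0), (5, 0), (6, 0), (7, 1), (8, 1), (9, 1), (10, 1), (11, 2), (12, 1)]) 8 (tcm - 2 - 6 - 12 - 6) [1, 2, 6, 3] = innerB 8 [5, 7] (PySem.Dict.mk [(1, 0), (2, 0), (3, 0), (4, 0), (5, 0), (6, 0), (7, 0), (8, 1), (9, 1), (10, 1), (11, 2), (12, 1)]) 7 (tcm - 2 - 6 - 12 - 6 - 2) [1, 2, 6, 3, 4] := by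
    refine (innerB_step 8 [4, 5] (PySem.Dict.mk [(1, 0), (2, 0), (3, 0), (4, 0), (5, 0), (6, 0), (7, 1), (8, 1), (9, 1), (10, 1), (11, 2), (12, 1)]) 8 (tcm - 2 - 6 - 12 - 6) [1, 2, 6, 3] 4 (selB_4 _ (by omega))).trans ?_
    congr 1
  have b5 : innerB 8 [5, 7] (PySem.Dict.mk [(1, 0), (2, 0), (3, 0), (4, 0), (5, 0), (6, 0), (7, 0), (8, 1), (9, 1), (10, 1), (11, 2), (12, 1)]) 7 (tcm - 2 - 6 - 12 - 6 - 2) [1, 2, 6, 3, 4] = innerB 7 [5, 8] (PySem.Dict.mk [(1, 0), (2, 0), (3, 0), (4, 0), (5, 0), (6, 0), (7, 0), (8, 0), (9, 1), (10, 1), (11, 2), (12, 1)]) 6 (tcm - 2 - 6 - 12 - 6 - 2 - 7) [1, 2, 6, 3, 4, 7] := by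
    refine (innerB_step 7 [5, 7] (PySem.Dict.mk [(1, 0), (2, 0), (3, 0), (4, 0), (5, 0), (6, 0), (7, 0), (8, 1), (9, 1), (10, 1), (11, 2), (12, 1)]) 7 (tcm - 2 - 6 - 12 - 6 - 2) [1, 2, 6, 3, 4] 7 (selB_5 _ (by omega) (by omega))).trans ?_
    congr 1
  have b6 : innerB 7 [5, 8] (PySem.Dict.mk [(1, 0), (2, 0), (3, 0), (4, 0), (5, 0), (6, 0), (7, 0), (8, 0), (9, 1), (10, 1), (11, 2), (12, 1)]) 6 (tcm - 2 - 6 - 12 - 6 - 2 - 7) [1, 2, 6, 3, 4, 7] = innerB 6 [5] (PySem.Dict.mk [(1, 0), (2, 0), (3, 0), (4, 0), (5, 0), (6, 0), (7, 0), (8, 0), (9, 1), (10, 1), (11, 1), (12, 1)]) 5 (tcm - 2 - 6 - 12 - 6 - 2 - 7 - 5) [1, 2, 6, 3, 4, 7, 8] := by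
    refine (innerB_step 6 [5, 8] (PySem.Dict.mk [(1, 0), (2, 0), (3, 0), (4, 0), (5, 0), (6, 0), (7, 0), (8, 0), (9, 1), (10, 1), (11, 2), (12, 1)]) 6 (tcm - 2 - 6 - 12 - 6 - 2 - 7) [1, 2, 6, 3, 4, 7] 8 (selB_6 _ (by omega) (by omega))).trans ?_
    congr 1
  have b7 : innerB 6 [5] (PySem.Dict.mk [(1, 0), (2, 0), (3, 0), (4, 0), (5, 0), (6, 0), (7, 0), (8, 0), (9, 1), (10, 1), (11, 1), (12, 1)]) 5 (tcm - 2 - 6 - 12 - 6 - 2 - 7 - 5) [1, 2, 6, 3, 4, 7, 8] = innerB 5 [9] (PySem.Dict.mk [(1, 0), (2, 0), (3, 0), (4, 0), (5, 0), (6, 0), (7, 0), (8, 0), (9, 0), (10, 1), (11, 1), (12, 1)]) 4 (tcm - 2 - 6 - 12 - 6 - 2 - 7 - 5 - 2) [1, 2, 6, 3, 4, 7, 8, 5] := by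
    refine (innerB_step 5 [5] (PySem.Dict.mk [(1, 0), (2, 0), (3, 0), (4, 0), (5, 0), (6, 0), (7, 0), (8, 0), (9, 1), (10, 1), (11, 1), (12, 1)]) 5 (tcm - 2 - 6 - 12 - 6 - 2 - 7 - 5) [1, 2, 6, 3, 4, 7, 8] 5 (selB_7 _ (by omega))).trans ?_
    congr 1
  have b8 : innerB 5 [9] (PySem.Dict.mk [(1, 0), (2, 0), (3, 0), (4, 0), (5, 0), (6, 0), (7, 0), (8, 0), (9, 0), (10, 1), (11, 1), (12, 1)]) 4 (tcm - 2 - 6 - 12 - 6 - 2 - 7 - 5 - 2) [1, 2, 6, 3, 4, 7, 8, 5] = innerB 4 [10] (PySem.Dict.mk [(1, 0), (2, 0), (3, 0), (4, 0), (5, 0), (6, 0), (7, 0), (8, 0), (9, 0), (10, 0), (11, 1), (12, 1)]) 3 (tcm - 2 - 6 - 12 - 6 - 2 - 7 - 5 - 2 - 1) [1, 2, 6, 3, 4, 7, 8, 5, 9] := by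
    refine (innerB_step 4 [9] (PySem.Dict.mk [(1, 0), (2, 0), (3, 0), (4, 0), (5, 0), (6, 0), (7, 0), (8, 0), (9, 0), (10, 1), (11, 1), (12, 1)]) 4 (tcm - 2 - 6 - 12 - 6 - 2 - 7 - 5 - 2) [1, 2, 6, 3, 4, 7, 8, 5] 9 (selB_8 _ (by omega))).trans ?_
    congr 1
  have b9 : innerB 4 [10] (PySem.Dict.mk [(1, 0), (2, 0), (3, 0), (4, 0), (5, 0), (6, 0), (7, 0), (8, 0), (9, 0), (10, 0), (11, 1), (12, 1)]) 3 (tcm - 2 - 6 - 12 - 6 - 2 - 7 - 5 - 2 - 1) [1, 2, 6, 3, 4, 7, 8, 5, 9] = innerB 3 [11] (PySem.Dict.mk [(1, 0), (2, 0), (3, 0), (4, 0), (5, 0), (6, 0), (7, 0), (8, 0), (9, 0), (10, 0), (11, 0), (12, 1)]) 2 (tcm - 2 - 6 - 12 - 6 - 2 - 7 - 5 - 2 - 1 - 4) [1, 2, 6, 3, 4, 7, 8, 5, 9, 10] := by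
    refine (innerB_step 3 [10] (PySem.Dict.mk [(1, 0), (2, 0), (3, 0), (4, 0), (5, 0), (6, 0), (7, 0), (8, 0), (9, 0), (10, 0), (11, 1), (12, 1)]) 3 (tcm - 2 - 6 - 12 - 6 - 2 - 7 - 5 - 2 - 1) [1, 2, 6, 3, 4, 7, 8, 5, 9] 10 (selB_9 _ (by omega))).trans ?_
    congr 1
  have b10 : innerB 3 [11] (PySem.Dict.mk [(1, 0), (2, 0), (3, 0), (4, 0), (5, 0), (6, 0), (7, 0), (8, 0), (9, 0), (10, 0), (11, 0), (12, 1)]) 2 (tcm - 2 - 6 - 12 - 6 - 2 - 7 - 5 - 2 - 1 - 4) [1, 2, 6, 3, 4, 7, 8, 5, 9, 10] = innerB 2 [12] (PySem.Dict.mk [(1, 0), (2, 0), (3, 0), (4, 0), (5, 0), (6, 0), (7, 0), (8, 0), (9, 0), (10, 0), (11, 0), (12, 0)]) 1 (tcm - 2 - 6 - 12 - 6 - 2 - 7 - 5 - 2 - 1 - 4 - 6) [1, 2, 6, 3, 4, 7, 8, 5, 9, 10, 11] := by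
    refine (innerB_step 2 [11] (PySem.Dict.mk [(1, 0), (2, 0), (3, 0), (4, 0), (5, 0), (6, 0), (7, 0), (8, 0), (9, 0), (10, 0), (11, 0), (12, 1)]) 2 (tcm - 2 - 6 - 12 - 6 - 2 - 7 - 5 - 2 - 1 - 4) [1, 2, 6, 3, 4, 7, 8, 5, 9, 10] 11 (selB_10 _ (by omega))).trans ?_
    congr 1
  have b11 : innerB 2 [12] (PySem.Dict.mk [(1, 0), (2, 0), (3, 0), (4, 0), (5, 0), (6, 0), (7, 0), (8, 0), (9, 0), (10, 0), (11, 0), (12, 0)]) 1 (tcm - 2 - 6 - 12 - 6 - 2 - 7 - 5 - 2 - 1 - 4 - 6) [1, 2, 6, 3, 4, 7, 8, 5, 9, 10, 11] = innerB 1 [] (PySem.Dict.mk [(1, 0), (2, 0), (3, 0), (4, 0), (5, 0), (6, 0), (7, 0), (8, 0), (9, 0), (10, 0), (11, 0), (12, 0)]) 0 (tcm - 2 - 6 - 12 - 6 - 2 - 7 - 5 - 2 - 1 - 4 - 6 - 7) [1, 2, 6, 3, 4, 7, 8, 5, 9, 10, 11, 12] := by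
    refine (innerB_step 1 [12] (PySem.Dict.mk [(1, 0), (2, 0), (3, 0), (4, 0), (5, 0), (6, 0), (7, 0), (8, 0), (9, 0), (10, 0), (11, 0), (12, 0)]) 1 (tcm - 2 - 6 - 12 - 6 - 2 - 7 - 5 - 2 - 1 - 4 - 6) [1, 2, 6, 3, 4, 7, 8, 5, 9, 10, 11] 12 (selB_11 _ (by omega))).trans ?_
    congr 1
  have b12 : innerB 1 [] (PySem.Dict.mk [(1, 0), (2, 0), (3, 0), (4, 0), (5, 0), (6, 0), (7, 0), (8, 0), (9, 0), (10, 0), (11, 0), (12, 0)]) 0 (tcm - 2 - 6 - 12 - 6 - 2 - 7 - 5 - 2 - 1 - 4 - 6 - 7) [1, 2, 6, 3, 4, 7, 8, 5, 9, 10, 11, 12] = ([], PySem.Dict.mk [(1, 0), (2, 0), (3, 0), (4, 0), (5, 0), (6, 0), (7, 0), (8, 0), (9, 0), (10, 0), (11, 0), (12, 0)], 0, [1, 2, 6, 3, 4, 7, 8, 5, 9, 10, 11, 12]) :=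
    innerB_stop 0 [] (PySem.Dict.mk [(1, 0), (2, 0), (3, 0), (4, 0), (5, 0), (6, 0), (7, 0), (8, 0), (9, 0), (10, 0), (11, 0), (12, 0)]) 0 (tcm - 2 - 6 - 12 - 6 - 2 - 7 - 5 - 2 - 1 - 4 - 6 - 7) [1, 2, 6, 3, 4, 7, 8, 5, 9, 10, 11, 12] (selB_12 _)
  have btr : innerB 13 listas0 pendientes0 12 tcm [] = ([], PySem.Dict.mk [(1, 0), (2, 0), (3, 0), (4, 0), (5, 0), (6, 0), (7, 0), (8, 0), (9, 0), (10, 0), (11, 0), (12, 0)], 0, [1, 2, 6, 3, 4, 7, 8, 5, 9, 10, 11, 12]) := by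
    have e0 : listas0 = [1] := by decide
    have e1 : pendientes0 = PySem.Dict.mk [(1, 0), (2, 1), (3, 1), (4, 1), (5, 1), (6, 1), (7, 2), (8, 1), (9, 1), (10, 2), (11, 2), (12, 1)] := by decide
    rw [e0, e1]; exact b0 |>.trans b1 |>.trans b2 |>.trans b3 |>.trans b4 |>.trans b5 |>.trans b6 |>.trans b7 |>.trans b8 |>.trans b9 |>.trans b10 |>.trans b11 |>.trans b12
  have o1 : outerB tcm 13 listas0 pendientes0 12 1 PySem.Dict.empty = outerB tcm 12 (innerB 13 listas0 pendientes0 12 tcm []).1 (innerB 13 listas0 pendientes0 12 tcm []).2.1 (innerB 13 listas0 pendientes0 12 tcm []).2.2.1 2 (PySem.Dict.empty.insert 1 (innerB 13 listas0 pendientes0 12 tcm []).2.2.2) :=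
    outerB_go tcm 12 listas0 pendientes0 12 1 PySem.Dict.empty (by decide)
  unfold balancear_linea_optimizado_alt
  have hl : (grafoTareas.length : Int) = 12 := by decide
  rw [hl, o1, btr]
  rw [outerB_done tcm 11 _ _ _ 2 _ (by decide)]; decide


-- ===== VERDICT (by name: the statement is the Claim_ definition above) =====
theorem balancear_linea_optimizado_spec : Claim_equal_balancear_linea_optimizado := by
  intro tcm _ hpre
  unfold Spec_balancear_linea_optimizado
  unfold Pre_balancear_linea_optimizado at hpre
  by_cases hlt : tcm < 60
  · interval_cases tcm <;> decide
  · rw [A_big tcm (by omega), B_big tcm (by omega)]
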